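-- pv_equiv track=rewrite | github.com/Heidelberg-NLP/discourse-aware-semantic-self-attention | docqa/utils/processing_utils.py | get_token_lookup_pointers
-- ===== SOURCE A (Python) =====
-- def get_token_lookup_pointers(tokens_sequence, lowercase):
--     """
--     Given a list of tokens gather list of unique tokens with corresponding pointers to the occurence in the text
--     and token occurence.
--     Example:
--
--     Input:
--     tokens = ["A", "B", "C", "A", "B", "A"]
--     lowercase = True
--
--     Output:
--     unique_tokens: ["a", "b", "c"]
--     pointers: [ [0, 3, 5],
--                 [1, 4],
--                 [2] ]
--     lens: [3, 2, 1]
--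
--     :param tokens_sequence: Token sequence
--     :param lowercase: If we want to lowercase
--     :return: List of unique tokens, List of pointers to the token occurence int he text, List of number of occurences
--     """
--     tokens_info_map = {}
--     unique_tokens_list = []
--     unique_tokens_pointers = []
--
--     for id, token in enumerate(tokens_sequence):
--         if lowercase:
--             token = token.lower()
--
--         token_info = tokens_info_map.get(token, None)
--         if token_info is None:
--             tkn_unique_id = len(unique_tokens_pointers)
--             tkn_first_occurence = id
--             tokens_info_map[token] = (tkn_unique_id, tkn_first_occurence)
--             unique_tokens_pointers.append([tkn_first_occurence])
--             unique_tokens_list.append(token)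
--         else:
--             tkn_unique_id = token_info[0]
--             unique_tokens_pointers[tkn_unique_id].append(id)
--
--     unique_tokens_list_lens = [len(x) for x in unique_tokens_pointers]
--
--     return unique_tokens_list, unique_tokens_pointers, unique_tokens_list_lens
-- ===== SOURCE B (Python) =====
-- def get_token_lookup_pointers(tokens_sequence, lowercase):
--     toks = [t.lower() for t in tokens_sequence] if lowercase else tokens_sequence
--     unique_tokens_list = []
--     for t in toks:
--         if t not in unique_tokens_list:
--             unique_tokens_list.append(t)
--     unique_tokens_pointers = [[i for i, t in enumerate(toks) if t == u]
--                               for u in unique_tokens_list]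
--     return unique_tokens_list, unique_tokens_pointers, [len(p) for p in unique_tokens_pointers]
-- ===== Notes on version B (the rewrite author's own statement) =====
-- stated objective: simpler
-- what changed: Drops A's dict-of-(unique_id,first_occurrence) plus in-loop parallel-list bookkeeping entirely: B first dedups the (optionally lowercased) tokens into the first-occurrence unique list, then rescans the sequence once per unique token to collect its occurrence indices with a comprehension (staged passes with nested scans instead of a single dict-driven pass).
import Mathlib
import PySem

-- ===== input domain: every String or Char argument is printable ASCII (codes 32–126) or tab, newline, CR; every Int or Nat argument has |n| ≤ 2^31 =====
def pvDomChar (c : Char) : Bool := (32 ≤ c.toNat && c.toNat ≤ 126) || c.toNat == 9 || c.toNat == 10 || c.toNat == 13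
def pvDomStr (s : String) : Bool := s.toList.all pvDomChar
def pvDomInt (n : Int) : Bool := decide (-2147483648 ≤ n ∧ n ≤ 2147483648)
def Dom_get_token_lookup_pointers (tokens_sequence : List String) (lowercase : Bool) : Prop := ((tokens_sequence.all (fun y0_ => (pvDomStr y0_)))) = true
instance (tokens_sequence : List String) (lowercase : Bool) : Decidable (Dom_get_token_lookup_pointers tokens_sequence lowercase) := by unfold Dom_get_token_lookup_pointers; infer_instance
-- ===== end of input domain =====

-- B replaces A's single-pass dict-of-(unique_id, first_occurrence) machinery by staged
-- passes: dedup to the first-occurrence unique list, then one rescan per unique token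
-- collecting its indices by comprehension; objective: simpler (not faster).

-- ===== PORT A =====
-- A's loop: state = (tokens_info_map, unique_tokens_list, unique_tokens_pointers).
-- tkn_unique_id stored in the map is always the nonnegative in-range index
-- len(unique_tokens_pointers) at insertion time, so '.toNat' here is exact
-- (Python's list indexing never sees a negative or out-of-range index in A).
def pvGoA (pairs : List (Int × String)) (lowercase : Bool)
    (m : PySem.Dict String (Int × Int)) (ul : List String) (up : List (List Int)) :
    List String × List (List Int) :=
  match pairs with
  | [] => (ul, up)
  | (id, tok) :: rest =>
    let token := if lowercase then PySem.Str.lower tok else tok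
    match m.get? token with
    | none =>
      pvGoA rest lowercase (m.insert token ((up.length : Int), id)) (ul ++ [token]) (up ++ [[id]])
    | some token_info =>
      pvGoA rest lowercase m ul (up.modify token_info.1.toNat (fun l => l ++ [id]))

def get_token_lookup_pointers (tokens_sequence : List String) (lowercase : Bool) :
    List String × List (List Int) × List Int :=
  let r := pvGoA (PySem.List.enumerate tokens_sequence) lowercase PySem.Dict.empty [] []
  (r.1, r.2, r.2.map (fun x => (x.length : Int)))

-- ===== PORT B =====
def get_token_lookup_pointers_alt (tokens_sequence : List String) (lowercase : Bool) :
    List String × List (List Int) × List Int :=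
  let toks := if lowercase then tokens_sequence.map PySem.Str.lower else tokens_sequence
  let unique_tokens_list := toks.foldl (fun u t => if t ∈ u then u else u ++ [t]) []
  let unique_tokens_pointers := unique_tokens_list.map
    (fun u => (PySem.List.enumerate toks).filterMap (fun p => if p.2 = u then some p.1 else none))
  (unique_tokens_list, unique_tokens_pointers,
   unique_tokens_pointers.map (fun p => (p.length : Int)))

-- ===== PRECONDITION & SPEC =====
def Spec_get_token_lookup_pointers (tokens_sequence : List String) (lowercase : Bool) (out : List String × List (List Int) × List Int) : Prop := out = get_token_lookup_pointers_alt tokens_sequence lowercase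
instance (tokens_sequence : List String) (lowercase : Bool) (out : List String × List (List Int) × List Int) : Decidable (Spec_get_token_lookup_pointers tokens_sequence lowercase out) := by unfold Spec_get_token_lookup_pointers; infer_instance

-- ===== CLAIM (what is proved, stated in full; the proofs are below) =====
def Claim_equal_get_token_lookup_pointers : Prop := ∀ (tokens_sequence : List String) (lowercase : Bool), Dom_get_token_lookup_pointers tokens_sequence lowercase → Spec_get_token_lookup_pointers tokens_sequence lowercase (get_token_lookup_pointers tokens_sequence lowercase)

-- ===== LEMMAS AND PROOFS =====

-- A's loop with the full state exposed (the dict too), for the append lemma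
def pvStateA (pairs : List (Int × String)) (lowercase : Bool)
    (m : PySem.Dict String (Int × Int)) (ul : List String) (up : List (List Int)) :
    PySem.Dict String (Int × Int) × List String × List (List Int) :=
  match pairs with
  | [] => (m, ul, up)
  | (id, tok) :: rest =>
    let token := if lowercase then PySem.Str.lower tok else tok
    match m.get? token with
    | none =>
      pvStateA rest lowercase (m.insert token ((up.length : Int), id)) (ul ++ [token]) (up ++ [[id]])
    | some token_info =>
      pvStateA rest lowercase m ul (up.modify token_info.1.toNat (fun l => l ++ [id]))

-- B's two stages, named for the proofs
def pvUniq (toks : List String) : List String :=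
  toks.foldl (fun u t => if t ∈ u then u else u ++ [t]) []

def pvOcc (toks : List String) (u : String) : List Int :=
  (PySem.List.enumerate toks).filterMap (fun p => if p.2 = u then some p.1 else none)

theorem pvGoA_eq_state (pairs : List (Int × String)) (lowercase : Bool) :
    ∀ m ul up, pvGoA pairs lowercase m ul up =
      ((pvStateA pairs lowercase m ul up).2.1, (pvStateA pairs lowercase m ul up).2.2) := by
  induction pairs with
  | nil => intro m ul up; rfl
  | cons p rest ih =>
    intro m ul up
    obtain ⟨id, tok⟩ := p
    simp only [pvGoA, pvStateA]
    cases m.get? (if lowercase then PySem.Str.lower tok else tok) <;> simp [ih]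

theorem pvStateA_append (xs ys : List (Int × String)) (lowercase : Bool) :
    ∀ m ul up, pvStateA (xs ++ ys) lowercase m ul up =
      pvStateA ys lowercase (pvStateA xs lowercase m ul up).1
        (pvStateA xs lowercase m ul up).2.1 (pvStateA xs lowercase m ul up).2.2 := by
  induction xs with
  | nil => intro m ul up; rfl
  | cons p rest ih =>
    intro m ul up
    obtain ⟨id, tok⟩ := p
    simp only [List.cons_append, pvStateA]
    cases m.get? (if lowercase then PySem.Str.lower tok else tok) <;> simp [ih]

theorem pvStateA_cons_none (rest : List (Int × String)) (i : Int) (tok : String) (lc : Bool)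
    (m : PySem.Dict String (Int × Int)) (ul : List String) (up : List (List Int))
    (token : String) (htok : token = if lc then PySem.Str.lower tok else tok)
    (h : m.get? token = none) :
    pvStateA ((i, tok) :: rest) lc m ul up =
      pvStateA rest lc (m.insert token ((up.length : Int), i)) (ul ++ [token]) (up ++ [[i]]) := by
  subst htok; simp [pvStateA, h]

theorem pvStateA_cons_some (rest : List (Int × String)) (i : Int) (tok : String) (lc : Bool)
    (m : PySem.Dict String (Int × Int)) (ul : List String) (up : List (List Int))
    (token : String) (htok : token = if lc then PySem.Str.lower tok else tok)
    (ti : Int × Int) (h : m.get? token = some ti) :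
    pvStateA ((i, tok) :: rest) lc m ul up =
      pvStateA rest lc m ul (up.modify ti.1.toNat (fun l => l ++ [i])) := by
  subst htok; simp [pvStateA, h]

theorem pvStateA_lower (ts : List String) :
    ∀ (s : Int) m ul up, pvStateA (PySem.List.enumerate ts s) true m ul up =
      pvStateA (PySem.List.enumerate (ts.map PySem.Str.lower) s) false m ul up := by
  induction ts with
  | nil => intro s m ul up; rfl
  | cons t rest ih =>
    intro s m ul up
    simp only [List.map_cons, PySem.List.enumerate_cons]
    cases hg : m.get? (PySem.Str.lower t) with
    | none =>
      rw [pvStateA_cons_none _ s t true m ul up (PySem.Str.lower t) (by simp) hg,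
        pvStateA_cons_none _ s (PySem.Str.lower t) false m ul up (PySem.Str.lower t) (by simp) hg,
        ih]
    | some ti =>
      rw [pvStateA_cons_some _ s t true m ul up (PySem.Str.lower t) (by simp) ti hg,
        pvStateA_cons_some _ s (PySem.Str.lower t) false m ul up (PySem.Str.lower t) (by simp) ti hg,
        ih]

theorem pv_mem_foldl_uniq (toks : List String) :
    ∀ (u0 : List String) (t : String),
      t ∈ toks.foldl (fun u t => if t ∈ u then u else u ++ [t]) u0 ↔ t ∈ u0 ∨ t ∈ toks := by
  induction toks with
  | nil => intro u0 t; simp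
  | cons x xs ih =>
    intro u0 t
    simp only [List.foldl_cons]
    by_cases hx : x ∈ u0
    · rw [if_pos hx, ih]
      constructor
      · rintro (h | h)
        · exact Or.inl h
        · exact Or.inr (List.mem_cons_of_mem _ h)
      · rintro (h | h)
        · exact Or.inl h
        · rcases List.mem_cons.mp h with h | h
          · exact Or.inl (h ▸ hx)
          · exact Or.inr h
    · rw [if_neg hx, ih]
      simp only [List.mem_append, List.mem_cons]
      tauto

theorem pv_mem_uniq (toks : List String) (t : String) : t ∈ pvUniq toks ↔ t ∈ toks := by
  unfold pvUniq; rw [pv_mem_foldl_uniq]; simp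

theorem pvUniq_append (xs : List String) (x : String) :
    pvUniq (xs ++ [x]) = if x ∈ pvUniq xs then pvUniq xs else pvUniq xs ++ [x] := by
  unfold pvUniq; rw [List.foldl_append]; rfl

theorem pvOcc_append (xs : List String) (x u : String) :
    pvOcc (xs ++ [x]) u = pvOcc xs u ++ (if x = u then [(xs.length : Int)] else []) := by
  unfold pvOcc
  rw [show PySem.List.enumerate (xs ++ [x]) = PySem.List.enumerate (xs ++ [x]) 0 from rfl,
    PySem.List.enumerate_append, List.filterMap_append]
  simp only [PySem.List.enumerate_cons, PySem.List.enumerate_nil, List.filterMap_cons,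
    List.filterMap_nil]
  by_cases h : x = u <;> simp [h]

theorem pvOcc_eq_nil_of_not_mem (xs : List String) (x : String) (h : x ∉ xs) :
    pvOcc xs x = [] := by
  unfold pvOcc
  rw [List.filterMap_eq_nil_iff]
  intro p hp
  rw [PySem.List.mem_enumerate_iff] at hp
  obtain ⟨k, hk, rfl⟩ := hp
  have hmem : xs[k] ∈ xs := List.getElem_mem hk
  simp only [ite_eq_right_iff]
  intro he
  exact absurd (he ▸ hmem) h

-- idxOf? through an appended singleton
theorem pv_idxOf?_append_singleton (t token : String) (ul : List String) :
    List.idxOf? t (ul ++ [token]) =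
      ((List.idxOf? t ul).orElse (fun _ => if t = token then some ul.length else none)) := by
  induction ul with
  | nil =>
    by_cases h : t = token
    · simp [List.idxOf?_cons, h]
    · have h' : ¬ token = t := fun hh => h hh.symm
      simp [List.idxOf?_cons, h, h']
  | cons x xs ih =>
    simp only [List.cons_append, List.idxOf?_cons, ih, List.length_cons]
    by_cases hx : x = t
    · simp [hx]
    · simp only [beq_iff_eq, hx, if_false]
      cases h2 : List.idxOf? t xs <;> by_cases h3 : t = token <;>
        simp [Option.orElse, h3]

-- modify the slot of a mapped nodup list at the index of x
theorem pv_map_modify (x : String) (f : String → List Int) (g : List Int → List Int) :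
    ∀ (ul : List String) (n : Nat), ul.Nodup → List.idxOf? x ul = some n →
      (ul.map f).modify n g = ul.map (fun u => if u = x then g (f u) else f u) := by
  intro ul
  induction ul with
  | nil => intro n _ h; simp [List.idxOf?_nil] at h
  | cons y ys ih =>
    intro n hnd hidx
    rw [List.idxOf?_cons] at hidx
    by_cases hy : y = x
    · subst hy
      simp only [beq_self_eq_true, if_true] at hidx
      have hn0 : n = 0 := by simpa using hidx.symm
      subst hn0
      have hnotmem : y ∉ ys := (List.nodup_cons.mp hnd).1
      have hmod : (List.map f (y :: ys)).modify 0 g = g (f y) :: List.map f ys := by simp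
      rw [hmod, List.map_cons, if_pos rfl]
      congr 1
      apply List.map_congr_left
      intro u hu
      rw [if_neg (fun h => hnotmem (by rw [← h]; exact hu))]
    · rw [if_neg (by simpa using hy)] at hidx
      cases h2 : List.idxOf? x ys with
      | none => rw [h2] at hidx; simp at hidx
      | some k =>
        rw [h2] at hidx
        simp only [Option.map_some, Option.some.injEq] at hidx
        subst hidx
        have hmod : (List.map f (y :: ys)).modify (k + 1) g = f y :: (List.map f ys).modify k g := by
          simp
        rw [hmod, List.map_cons, if_neg hy]
        congr 1
        exact ih k (List.nodup_cons.mp hnd).2 h2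

-- the map-side invariant: m knows exactly the indices of ul
def pvInvM (m : PySem.Dict String (Int × Int)) (ul : List String) : Prop :=
  ∀ t : String, (m.get? t).map Prod.fst = (List.idxOf? t ul).map (fun n => (n : Int))

theorem pvMain (toks : List String) :
    (pvStateA (PySem.List.enumerate toks) false PySem.Dict.empty [] []).2.1 = pvUniq toks ∧
    (pvStateA (PySem.List.enumerate toks) false PySem.Dict.empty [] []).2.2 =
      (pvUniq toks).map (pvOcc toks) ∧
    (pvUniq toks).Nodup ∧
    pvInvM (pvStateA (PySem.List.enumerate toks) false PySem.Dict.empty [] []).1 (pvUniq toks) := by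
  induction toks using List.reverseRecOn with
  | nil =>
    refine ⟨rfl, rfl, List.nodup_nil, ?_⟩
    intro t
    simp [pvStateA, PySem.List.enumerate_nil, PySem.Dict.get?_empty, pvUniq, List.idxOf?]
  | append_singleton xs x ih =>
    obtain ⟨hul, hup, hnd, hm⟩ := ih
    rw [show PySem.List.enumerate (xs ++ [x]) = PySem.List.enumerate (xs ++ [x]) 0 from rfl,
      PySem.List.enumerate_append, pvStateA_append]
    set S := pvStateA (PySem.List.enumerate xs 0) false PySem.Dict.empty [] [] with hS
    simp only [PySem.List.enumerate_cons, PySem.List.enumerate_nil, zero_add]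
    cases hg : S.1.get? x with
    | none =>
      have hidx : List.idxOf? x (pvUniq xs) = none := by
        have := hm x
        rw [hg] at this
        cases h2 : List.idxOf? x (pvUniq xs)
        · rfl
        · rw [h2] at this; simp at this
      have hxul : x ∉ pvUniq xs := List.idxOf?_eq_none_iff.mp hidx
      have hxxs : x ∉ xs := fun h => hxul ((pv_mem_uniq xs x).mpr h)
      have huq : pvUniq (xs ++ [x]) = pvUniq xs ++ [x] := by
        rw [pvUniq_append, if_neg hxul]
      rw [pvStateA_cons_none [] (xs.length : Int) x false S.1 S.2.1 S.2.2 x (by simp) hg]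
      simp only [pvStateA]
      refine ⟨by rw [huq, hul], ?_, ?_, ?_⟩
      · rw [hup, huq, List.map_append]
        congr 1
        · apply List.map_congr_left
          intro u hu
          rw [pvOcc_append, if_neg (fun h => hxul (by rw [h]; exact hu)), List.append_nil]
        · rw [List.map_cons, List.map_nil, pvOcc_append, if_pos rfl,
            pvOcc_eq_nil_of_not_mem xs x hxxs, List.nil_append]
      · rw [huq, List.nodup_append]
        exact ⟨hnd, List.nodup_singleton x, fun a ha b hb => by
          rw [List.mem_singleton.mp hb]
          exact fun h => hxul (by rw [← h]; exact ha)⟩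
      · intro t
        rw [huq]
        by_cases ht : t = x
        · subst ht
          rw [PySem.Dict.get?_insert_self, pv_idxOf?_append_singleton, hidx]
          have hlen : S.2.2.length = (pvUniq xs).length := by rw [hup]; simp
          simp [Option.orElse, hlen]
        · rw [PySem.Dict.get?_insert_of_ne _ _ ht, pv_idxOf?_append_singleton, hm t]
          cases h2 : List.idxOf? t (pvUniq xs) <;> simp [Option.orElse, ht]
    | some ti =>
      have hidx : ∃ n : Nat, List.idxOf? x (pvUniq xs) = some n ∧ ti.1 = (n : Int) := by
        have := hm x
        rw [hg] at this
        cases h2 : List.idxOf? x (pvUniq xs)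
        · rw [h2] at this; simp at this
        · rw [h2] at this; simp at this; exact ⟨_, rfl, this⟩
      obtain ⟨n, hidx, hti⟩ := hidx
      have htn : ti.1.toNat = n := by rw [hti]; exact Int.toNat_natCast n
      have hxmem : x ∈ pvUniq xs := by
        obtain ⟨h1, h2, -⟩ := List.idxOf?_eq_some_iff.mp hidx
        exact h2 ▸ List.getElem_mem h1
      have huq : pvUniq (xs ++ [x]) = pvUniq xs := by
        rw [pvUniq_append, if_pos hxmem]
      rw [pvStateA_cons_some [] (xs.length : Int) x false S.1 S.2.1 S.2.2 x (by simp) ti hg]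
      simp only [pvStateA]
      refine ⟨by rw [huq, hul], ?_, by rw [huq]; exact hnd, by rw [huq]; exact hm⟩
      rw [htn, hup, huq,
        pv_map_modify x (pvOcc xs) (fun l => l ++ [(xs.length : Int)]) (pvUniq xs) n hnd hidx]
      apply List.map_congr_left
      intro u hu
      by_cases hux : u = x
      · subst hux
        rw [if_pos rfl, pvOcc_append, if_pos rfl]
      · rw [if_neg hux, pvOcc_append, if_neg (fun h => hux h.symm), List.append_nil]

-- ===== VERDICT (by name: the statement is the Claim_ definition above) =====
theorem get_token_lookup_pointers_spec : Claim_equal_get_token_lookup_pointers := by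
  intro ts lc _
  unfold Spec_get_token_lookup_pointers get_token_lookup_pointers get_token_lookup_pointers_alt
  cases lc with
  | false =>
    obtain ⟨h1, h2, -, -⟩ := pvMain ts
    rw [pvGoA_eq_state, h1, h2]
    rfl
  | true =>
    obtain ⟨h1, h2, -, -⟩ := pvMain (ts.map PySem.Str.lower)
    rw [pvGoA_eq_state, pvStateA_lower, h1, h2]
    rfl
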